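-- pv_equiv track=rewrite | github.com/tblisty/PrakPyth_projects | Motu_proprio/CSV_to_dic-draft/CSV_to_dic-draft.py | decommenting
-- ===== SOURCE A (Python) =====
-- def decommenting(start_range_f1, content_f2):
--     # Simple decomment
--     #Jeżeli w linii przed pojawieniem się kratki pojawi się coś innego niż znak niedrukowalny, to taka linia nie będzie uwzględniona
--     else_mode = False
--     decommented = ""
--     comment_mode = False
--     len_f2 = len(content_f2)
--     for char in range(start_range_f1, len_f2):
--         if content_f2[char] == '#':
--             if else_mode:
--                 decommented += content_f2[char]
--             else:
--                 comment_mode = True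
--         elif content_f2[char] == '\n':
--             else_mode = False
--             if comment_mode:
--                 comment_mode = False
--             else:
--                 decommented += content_f2[char]
--         elif content_f2[char].isspace():
--             if comment_mode:
--                 pass
--             else:
--                 decommented += content_f2[char]
--             pass
--         else:
--             if not comment_mode:
--                 else_mode = True
--                 decommented += content_f2[char]
--     return decommented
-- ===== SOURCE B (Python) =====
-- def decommenting(start_range_f1, content_f2):
--     # Line-based rewrite: split the tail on '\n'; a line whose first
--     # non-whitespace character is '#' contributes only its leading
--     # whitespace (and swallows its newline); every other line is kept.
--     lines = content_f2[start_range_f1:].split('\n')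
--     out = ""
--     for i, line in enumerate(lines):
--         stripped = line.lstrip()
--         if stripped.startswith('#'):
--             out += line[:len(line) - len(stripped)]
--         else:
--             out += line
--             if i < len(lines) - 1:
--                 out += '\n'
--     return out
-- ===== Notes on version B (the rewrite author's own statement) =====
-- stated objective: faster
-- what changed: A's single character-by-character scan with three mutable flags (else_mode/comment_mode) is replaced by a line-based pass: split the tail on ' ', keep each line whole unless its first non-whitespace character is '#', in which case keep only its leading whitespace and drop its newline.
-- outside the precondition, e.g. on decommenting(-1, 'ab'): A returns 'bab', B returns 'b'; on decommenting(-2, 'a#b\nc'): A returns '\nca#b\nc', B returns '\nc'; on decommenting(-5, 'ab'): A raises IndexError, B returns 'ab'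
import Mathlib
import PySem

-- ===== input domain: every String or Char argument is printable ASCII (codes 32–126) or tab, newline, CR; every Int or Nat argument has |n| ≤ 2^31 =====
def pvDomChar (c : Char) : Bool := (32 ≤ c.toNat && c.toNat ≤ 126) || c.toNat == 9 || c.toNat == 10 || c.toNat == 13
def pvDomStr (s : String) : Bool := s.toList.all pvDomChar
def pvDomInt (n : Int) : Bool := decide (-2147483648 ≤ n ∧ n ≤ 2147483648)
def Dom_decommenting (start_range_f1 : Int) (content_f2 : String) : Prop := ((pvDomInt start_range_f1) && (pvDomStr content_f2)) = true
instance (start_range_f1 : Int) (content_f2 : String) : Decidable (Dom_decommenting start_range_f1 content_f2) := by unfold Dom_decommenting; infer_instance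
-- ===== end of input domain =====

-- B replaces A's three-flag character automaton by a line-based pass (split the tail on
-- '\n'; a comment line contributes only its leading whitespace and swallows its newline);
-- return values proved equal for 0 ≤ start_range_f1.

-- ===== PORT A =====
-- loop body of A's for-loop, on the state (else_mode, decommented, comment_mode)
def decommentingStep (st : Bool × List Char × Bool) (c : Char) : Bool × List Char × Bool :=
  let (elseMode, decommented, commentMode) := st
  if c = '#' then
    if elseMode then (elseMode, decommented ++ [c], commentMode)
    else (elseMode, decommented, true)
  else if c = '\n' then
    if commentMode then (false, decommented, false)
    else (false, decommented ++ [c], commentMode)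
  else if PySem.Chars.isspace c then
    if commentMode then st else (elseMode, decommented ++ [c], commentMode)
  else
    if !commentMode then (true, decommented ++ [c], commentMode) else st

def decommenting (start_range_f1 : Int) (content_f2 : String) : String :=
  let cs := content_f2.toList
  -- content_f2[char]: ported with pyGetD, exact under Pre_ (every index of
  -- range(start_range_f1, len_f2) is then in range; Python raises only for start < -len)
  let res := (PySem.List.pyRange start_range_f1 (cs.length : Int) 1).foldl
    (fun st i => decommentingStep st (PySem.List.pyGetD cs i ' ')) (false, [], false)
  String.ofList res.2.1

-- ===== PORT B =====
-- loop body of B's for-loop over enumerate(lines); n = len(lines)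
def decommentingAltStep (n : Int) (out : List Char) (p : Int × List Char) : List Char :=
  let line := p.2
  let stripped := PySem.Chars.lstrip line
  if PySem.Chars.startswith stripped ['#'] then
    out ++ PySem.List.slice line none (some ((line.length : Int) - (stripped.length : Int)))
  else
    let out := out ++ line
    if p.1 < n - 1 then out ++ ['\n'] else out

def decommenting_alt (start_range_f1 : Int) (content_f2 : String) : String :=
  let text := PySem.List.slice content_f2.toList (some start_range_f1) none
  let lines := PySem.Chars.splitOn text ['\n']
  String.ofList ((PySem.List.enumerate lines 0).foldl (decommentingAltStep (lines.length : Int)) [])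

-- ===== PRECONDITION & SPEC =====
-- Pre_ keeps the natural domain 0 ≤ start_range_f1: for start_range_f1 < -len A raises
-- IndexError, and for -len ≤ start_range_f1 < 0 A's negative-index wraparound scans the
-- tail of the text and then the WHOLE text again — an accidental corner no caller would
-- specify; B's slice does the natural thing (the last -start_range_f1 characters) there.
def Pre_decommenting (start_range_f1 : Int) (content_f2 : String) : Prop :=
  0 ≤ start_range_f1
instance (start_range_f1 : Int) (content_f2 : String) : Decidable (Pre_decommenting start_range_f1 content_f2) := by unfold Pre_decommenting; infer_instance

def pvWitness_decommenting : Int × String := (0, "a\n #b\nc")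

def Spec_decommenting (start_range_f1 : Int) (content_f2 : String) (out : String) : Prop := out = decommenting_alt start_range_f1 content_f2
instance (start_range_f1 : Int) (content_f2 : String) (out : String) : Decidable (Spec_decommenting start_range_f1 content_f2 out) := by unfold Spec_decommenting; infer_instance

-- ===== CLAIM (what is proved, stated in full; the proofs are below) =====
def Claim_equal_decommenting : Prop := ∀ (start_range_f1 : Int) (content_f2 : String), Dom_decommenting start_range_f1 content_f2 → Pre_decommenting start_range_f1 content_f2 → Spec_decommenting start_range_f1 content_f2 (decommenting start_range_f1 content_f2)


-- ===== LEMMAS AND PROOFS =====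

def lsplit : List Char → List (List Char)
  | [] => [[]]
  | c :: t =>
    match lsplit t with
    | [] => [[c]]
    | h :: r => if c = '\n' then [] :: h :: r else (c :: h) :: r

lemma lsplit_cons_eq (c : Char) (t hd : List Char) (r : List (List Char)) (h : lsplit t = hd :: r) :
    lsplit (c :: t) = if c = '\n' then [] :: hd :: r else (c :: hd) :: r := by
  simp only [lsplit, h]

lemma lsplit_ne_nil (l : List Char) : lsplit l ≠ [] := by
  induction l with
  | nil => simp [lsplit]
  | cons c t ih =>
    rcases h : lsplit t with _ | ⟨hd, r⟩
    · exact absurd h ih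
    · rw [lsplit_cons_eq c t hd r h]; split <;> simp

lemma intercalate_cc (a b : List Char) (l : List (List Char)) :
    List.intercalate ['\n'] (a :: b :: l) = a ++ ['\n'] ++ List.intercalate ['\n'] (b :: l) := by
  simp [List.intercalate, List.intersperse]

lemma intercalate_lsplit (l : List Char) : List.intercalate ['\n'] (lsplit l) = l := by
  induction l with
  | nil => simp [lsplit, List.intercalate]
  | cons c t ih =>
    rcases h : lsplit t with _ | ⟨hd, r⟩
    · exact absurd h (lsplit_ne_nil t)
    · rw [h] at ih
      rw [lsplit_cons_eq c t hd r h]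
      by_cases hc : c = '\n'
      · subst hc; rw [if_pos rfl, intercalate_cc, ih]; rfl
      · rw [if_neg hc]
        rcases r with _ | ⟨y, r'⟩
        · simp_all [List.intercalate]
        · rw [intercalate_cc] at ih ⊢
          simp [← ih]

lemma no_nl_of_mem_lsplit (l : List Char) : ∀ s ∈ lsplit l, '\n' ∉ s := by
  induction l with
  | nil => simp [lsplit]
  | cons c t ih =>
    rcases h : lsplit t with _ | ⟨hd, r⟩
    · exact absurd h (lsplit_ne_nil t)
    · rw [h] at ih
      rw [lsplit_cons_eq c t hd r h]
      by_cases hc : c = '\n'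
      · subst hc; rw [if_pos rfl]
        intro s hs
        rcases List.mem_cons.1 hs with hs | hs
        · simp [hs]
        · exact ih s hs
      · rw [if_neg hc]
        intro s hs
        rcases List.mem_cons.1 hs with hs | hs
        · subst hs
          have := ih hd (by simp)
          simp only [List.mem_cons]
          rintro (e | e)
          · exact hc e.symm
          · exact this e
        · exact ih s (by simp [hs])

def consHead (p : List Char) : List (List Char) → List (List Char)
  | [] => [p]
  | h :: r => (p ++ h) :: r

lemma splitOn_go_eq : ∀ (fuel : Nat) (l cur : List Char) (acc : List (List Char)),
    l.length ≤ fuel →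
    PySem.Chars.splitOn.go ['\n'] fuel l cur acc = acc.reverse ++ consHead cur.reverse (lsplit l) := by
  intro fuel
  induction fuel with
  | zero =>
    intro l cur acc hl
    have : l = [] := List.length_eq_zero_iff.1 (Nat.le_zero.1 hl)
    subst this
    simp [PySem.Chars.splitOn.go, lsplit, consHead]
  | succ fuel ih =>
    intro l cur acc hl
    rcases l with _ | ⟨c, rest⟩
    · simp [PySem.Chars.splitOn.go, lsplit, consHead]
    · rcases hsp : lsplit rest with _ | ⟨hd, r⟩
      · exact absurd hsp (lsplit_ne_nil rest)
      · rw [lsplit_cons_eq c rest hd r hsp]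
        by_cases hc : c = '\n'
        · subst hc
          rw [show PySem.Chars.splitOn.go ['\n'] (fuel+1) ('\n' :: rest) cur acc
              = PySem.Chars.splitOn.go ['\n'] fuel rest [] (cur.reverse :: acc) from by
            simp [PySem.Chars.splitOn.go]]
          rw [ih rest [] (cur.reverse :: acc) (by simpa using Nat.lt_succ_iff.mp (by simpa using hl))]
          simp [hsp, consHead]
        · rw [show PySem.Chars.splitOn.go ['\n'] (fuel+1) (c :: rest) cur acc
              = PySem.Chars.splitOn.go ['\n'] fuel rest (c :: cur) acc from by
            simp [PySem.Chars.splitOn.go, List.isPrefixOf]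
            intro h; exact absurd h.symm hc]
          rw [ih rest (c :: cur) acc (by simpa using Nat.lt_succ_iff.mp (by simpa using hl))]
          rw [if_neg hc]
          simp [hsp, consHead]

lemma splitOn_eq (l : List Char) : PySem.Chars.splitOn l ['\n'] = lsplit l := by
  rw [PySem.Chars.splitOn, splitOn_go_eq (l.length + 1) l [] [] (by omega)]
  rcases h : lsplit l with _ | ⟨hd, r⟩
  · exact absurd h (lsplit_ne_nil l)
  · simp [consHead]

def isCommentLine (line : List Char) : Bool :=
  PySem.Chars.startswith (PySem.Chars.lstrip line) ['#']

lemma comm_line (cs : List Char) (h : '\n' ∉ cs) (acc : List Char) :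
    List.foldl decommentingStep (false, acc, true) cs = (false, acc, true) := by
  induction cs with
  | nil => rfl
  | cons c t ih =>
    have hc : c ≠ '\n' := fun e => h (e ▸ List.mem_cons_self)
    have ht : '\n' ∉ t := fun m => h (List.mem_cons_of_mem _ m)
    simp only [List.foldl_cons, decommentingStep]
    split_ifs <;> simp_all [ih ht]

lemma else_line (cs : List Char) (h : '\n' ∉ cs) (acc : List Char) :
    List.foldl decommentingStep (true, acc, false) cs = (true, acc ++ cs, false) := by
  induction cs generalizing acc with
  | nil => simp
  | cons c t ih =>
    have hc : c ≠ '\n' := fun e => h (e ▸ List.mem_cons_self)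
    have ht : '\n' ∉ t := fun m => h (List.mem_cons_of_mem _ m)
    simp only [List.foldl_cons, decommentingStep]
    split_ifs <;> simp_all [ih ht]

lemma isspace_hash : PySem.Chars.isspace '#' = false := by decide

lemma run_line (cs : List Char) (h : '\n' ∉ cs) (acc : List Char) :
    List.foldl decommentingStep (false, acc, false) cs =
      if isCommentLine cs then (false, acc ++ cs.takeWhile PySem.Chars.isspace, true)
      else (cs.any (fun c => !PySem.Chars.isspace c), acc ++ cs, false) := by
  induction cs generalizing acc with
  | nil => simp [isCommentLine, PySem.Chars.lstrip, PySem.Chars.startswith]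
  | cons c t ih =>
    have hc : c ≠ '\n' := fun e => h (e ▸ List.mem_cons_self)
    have ht : '\n' ∉ t := fun m => h (List.mem_cons_of_mem _ m)
    by_cases hsh : c = '#'
    · subst hsh
      simp only [List.foldl_cons, decommentingStep, if_neg (by decide : ¬(false = true)), if_true]
      rw [comm_line t ht]
      have hcl : isCommentLine ('#' :: t) = true := by
        simp [isCommentLine, PySem.Chars.lstrip, PySem.Chars.startswith, List.dropWhile, isspace_hash]
      rw [if_pos hcl]
      simp [List.takeWhile, isspace_hash]
    · by_cases hsp : PySem.Chars.isspace c
      · simp only [List.foldl_cons, decommentingStep, if_neg hsh, if_neg hc, if_pos hsp,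
          if_neg (by decide : ¬(false = true))]
        rw [ih ht (acc ++ [c])]
        have hl : PySem.Chars.lstrip (c :: t) = PySem.Chars.lstrip t := by
          simp [PySem.Chars.lstrip, List.dropWhile, hsp]
        have : isCommentLine (c :: t) = isCommentLine t := by simp [isCommentLine, hl]
        rw [this]
        split
        · simp [List.takeWhile, hsp]
        · simp [List.any_cons, hsp]
      · simp only [List.foldl_cons, decommentingStep, if_neg hsh, if_neg hc, if_neg hsp]
        simp only [Bool.not_false, if_true]
        rw [else_line t ht]
        have hcl : isCommentLine (c :: t) = false := by
          simp [isCommentLine, PySem.Chars.lstrip, List.dropWhile, hsp, PySem.Chars.startswith,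
            List.isPrefixOf]
          exact fun e => hsh e.symm
        rw [if_neg (by simp [hcl])]
        simp [List.any_cons, hsp]

def renderLine (line : List Char) : List Char :=
  if isCommentLine line then line.takeWhile PySem.Chars.isspace else line

def render : List (List Char) → List Char
  | [] => []
  | [x] => renderLine x
  | x :: y :: r => renderLine x ++ (if isCommentLine x then [] else ['\n']) ++ render (y :: r)

lemma step_nl_comment (acc : List Char) :
    decommentingStep (false, acc, true) '\n' = (false, acc, false) := by
  simp [decommentingStep]

lemma step_nl_nocomment (e : Bool) (acc : List Char) :
    decommentingStep (e, acc, false) '\n' = (false, acc ++ ['\n'], false) := by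
  simp [decommentingStep]

lemma runA_segs : ∀ (segs : List (List Char)), segs ≠ [] → (∀ s ∈ segs, '\n' ∉ s) →
    ∀ acc : List Char,
    (List.foldl decommentingStep (false, acc, false) (List.intercalate ['\n'] segs)).2.1
      = acc ++ render segs := by
  intro segs
  induction segs with
  | nil => simp
  | cons x rest ih =>
    intro _ hnl acc
    rcases rest with _ | ⟨y, r⟩
    · rw [show List.intercalate ['\n'] [x] = x from by simp [List.intercalate]]
      rw [run_line x (hnl x (by simp)) acc]
      simp only [render, renderLine]
      split <;> simp
    · rw [intercalate_cc, List.append_assoc, List.foldl_append]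
      rw [run_line x (hnl x (by simp)) acc]
      have hrest : ∀ s ∈ y :: r, '\n' ∉ s := fun s hs => hnl s (List.mem_cons_of_mem _ hs)
      by_cases hcl : isCommentLine x = true
      · rw [if_pos hcl]
        simp only [List.singleton_append, List.foldl_cons, step_nl_comment]
        rw [ih (by simp) hrest]
        simp [render, renderLine, hcl]
      · rw [if_neg hcl]
        simp only [List.singleton_append, List.foldl_cons, step_nl_nocomment]
        rw [ih (by simp) hrest]
        simp [render, renderLine, hcl]

lemma wsprefix_eq (line : List Char) :
    PySem.List.slice line none (some ((line.length : Int) - ((PySem.Chars.lstrip line).length : Int)))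
      = line.takeWhile PySem.Chars.isspace := by
  have hsum : (line.takeWhile PySem.Chars.isspace).length
      + (line.dropWhile PySem.Chars.isspace).length = line.length := by
    rw [← List.length_append, List.takeWhile_append_dropWhile]
  have hlen : (line.length : Int) - ((PySem.Chars.lstrip line).length : Int)
      = ((line.takeWhile PySem.Chars.isspace).length : Nat) := by
    rw [PySem.Chars.lstrip]; omega
  rw [hlen, PySem.List.slice_to_natCast]
  have h := List.take_left (l₁ := line.takeWhile PySem.Chars.isspace)
    (l₂ := line.dropWhile PySem.Chars.isspace)
  rw [List.takeWhile_append_dropWhile] at h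
  exact h

lemma runB_segs : ∀ (segs : List (List Char)) (n i : Int) (acc : List Char),
    n = i + segs.length → segs ≠ [] →
    List.foldl (decommentingAltStep n) acc (PySem.List.enumerate segs i) = acc ++ render segs := by
  intro segs
  induction segs with
  | nil => simp
  | cons x rest ih =>
    intro n i acc hn _
    rw [PySem.List.enumerate_cons, List.foldl_cons]
    rcases rest with _ | ⟨y, r⟩
    · simp only [PySem.List.enumerate_nil, List.foldl_nil]
      simp only [decommentingAltStep, wsprefix_eq]
      have : ¬ (i < n - 1) := by simp at hn; omega
      rw [if_neg this]
      simp only [render, renderLine, isCommentLine]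
      split <;> simp
    · rw [ih n (i+1) _ (by simp at hn ⊢; omega) (by simp)]
      have hlt : i < n - 1 := by simp at hn; omega
      simp only [decommentingAltStep, wsprefix_eq]
      by_cases hcm : PySem.Chars.startswith (PySem.Chars.lstrip x) ['#'] = true
      · simp [render, renderLine, isCommentLine, hcm]
      · simp [render, renderLine, isCommentLine, hcm, hlt]

lemma core_eq (l : List Char) :
    (List.foldl decommentingStep (false, [], false) l).2.1
      = List.foldl (decommentingAltStep ((PySem.Chars.splitOn l ['\n']).length : Int)) []
          (PySem.List.enumerate (PySem.Chars.splitOn l ['\n']) 0) := by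
  rw [splitOn_eq]
  rw [runB_segs (lsplit l) ((lsplit l).length : Int) 0 [] (by simp) (lsplit_ne_nil l)]
  conv_lhs => rw [← intercalate_lsplit l]
  rw [runA_segs (lsplit l) (lsplit_ne_nil l) (no_nl_of_mem_lsplit l) []]

lemma main_eq (start_range_f1 : Int) (content_f2 : String) (h : 0 ≤ start_range_f1) :
    decommenting start_range_f1 content_f2 = decommenting_alt start_range_f1 content_f2 := by
  simp only [decommenting, decommenting_alt]
  rw [PySem.List.foldl_pyRange_pyGetD' content_f2.toList ' ' decommentingStep _ h]
  rw [PySem.List.slice_from content_f2.toList h]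
  rw [core_eq]

-- ===== VERDICT (by name: the statement is the Claim_ definition above) =====
theorem decommenting_spec : Claim_equal_decommenting := by
  intro s c _ hpre
  unfold Spec_decommenting
  exact main_eq s c hpre
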